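-- pv_equiv track=rewrite | github.com/p0lish/adventofcode-2024 | day7/main.py | generate_values
-- ===== SOURCE A (Python) =====
-- from itertools import product
--
-- def generate_values(numbers):
--     def eval_expression(numbers, operations):
--         """Evaluate an expression using the given numbers and operations."""
--         result = numbers[0]
--         for i, op in enumerate(operations):
--             if op == '+':
--                 result += numbers[i + 1]
--             elif op == '*':
--                 result *= numbers[i + 1]
--             elif op == '|':
--                 result = int(str(result) + str(numbers[i + 1]))
--         return result
--
--     results = set()
--
--     n = len(numbers)
--     if n == 0:
--         return results
--
--     # Generate all possible subsets of numbers (including the full list)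
--             # Generate all permutations of the current subset
--                 # Generate all possible operations (length = len(perm) - 1)
--     p1_ops = ['+', '*']
--     p2_ops = ['+', '*', '|']
--     for ops in product(p1_ops, repeat=len(numbers) - 1):
--         result = eval_expression(numbers, ops)
--         results.add(result)
--     return results
-- ===== SOURCE B (Python) =====
-- def generate_values(numbers):
--     # Incremental DP: expand the collection of partial results one number at a
--     # time, deduplicating at every step (dict keys keep first-occurrence order),
--     # instead of evaluating all 2^(n-1) operator tuples.
--     results = set()
--     if not numbers:
--         return results
--     vals = {numbers[0]: None}
--     for x in numbers[1:]:
--         nxt = {}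
--         for v in vals:
--             nxt[v + x] = None
--             nxt[v * x] = None
--         vals = nxt
--     for v in vals:
--         results.add(v)
--     return results
-- ===== Notes on version B (the rewrite author's own statement) =====
-- stated objective: alternative
-- what changed: Replaces the enumeration of all 2^(n-1) operator tuples (each re-evaluated from scratch) with a per-number left-to-right DP that expands a deduplicated collection of partial results, so duplicate prefixes are evaluated once.
import Mathlib
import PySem

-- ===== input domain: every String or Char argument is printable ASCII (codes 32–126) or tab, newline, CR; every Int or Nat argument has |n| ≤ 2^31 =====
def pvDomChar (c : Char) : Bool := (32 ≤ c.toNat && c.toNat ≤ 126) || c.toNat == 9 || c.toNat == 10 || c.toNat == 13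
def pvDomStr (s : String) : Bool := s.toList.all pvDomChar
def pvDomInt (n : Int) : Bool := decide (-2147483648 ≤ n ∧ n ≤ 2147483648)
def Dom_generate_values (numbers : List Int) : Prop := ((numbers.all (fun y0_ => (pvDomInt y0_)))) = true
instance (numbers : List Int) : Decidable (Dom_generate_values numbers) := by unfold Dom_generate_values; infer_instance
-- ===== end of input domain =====

-- B replaces A's enumeration of all 2^(n-1) operator tuples by a per-number DP over a
-- deduplicated set of partial results; the returned set is proved identical.

-- ===== PORT A =====

-- one step of eval_expression's loop; the '|' branch is unreachable in A (ops are drawn from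
-- ['+','*'] only): ported as int(str(result)+str(m)), with 0 for the (never consulted) ValueError case
def pvStep (result : Int) (p : Char × Int) : Int :=
  if p.1 = '+' then result + p.2
  else if p.1 = '*' then result * p.2
  else if p.1 = '|' then ((PySem.Int.ofChars? (PySem.Int.toChars result ++ PySem.Int.toChars p.2)).getD 0)
  else result

-- eval_expression: result = numbers[0]; for i, op in enumerate(operations): result op= numbers[i+1]
-- (the enumerate-indexed loop pairs operations with numbers[1:], i.e. a fold over their zip;
-- numbers[0] is in range on every call A makes, so the total pyGetD form is exact here)
def pvEval (numbers : List Int) (ops : List Char) : Int :=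
  (ops.zip (numbers.drop 1)).foldl pvStep (PySem.List.pyGetD numbers 0 0)

-- itertools.product(['+','*'], repeat=k): rightmost coordinate varies fastest
def pvProduct : Nat → List (List Char)
  | 0 => [[]]
  | k+1 => (pvProduct k).map (fun t => '+' :: t) ++ (pvProduct k).map (fun t => '*' :: t)

def generate_values (numbers : List Int) : List Int :=
  let results : PySem.Set Int := PySem.Set.empty
  if numbers.length = 0 then results
  else (pvProduct (numbers.length - 1)).foldl
         (fun results ops => PySem.Set.add results (pvEval numbers ops)) results

-- ===== PORT B =====
def generate_values_alt (numbers : List Int) : List Int :=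
  let results : PySem.Set Int := PySem.Set.empty
  match numbers with
  | [] => results
  | x :: rest =>
      let vals := rest.foldl
        (fun vals y =>
          vals.keys.foldl
            (fun nxt v => PySem.Dict.insert (PySem.Dict.insert nxt (v + y) none) (v * y) none)
            PySem.Dict.empty)
        (PySem.Dict.insert (PySem.Dict.empty : PySem.Dict Int (Option Int)) x none)
      vals.keys.foldl (fun res v => PySem.Set.add res v) results

-- ===== PRECONDITION & SPEC =====
def Spec_generate_values (numbers : List Int) (out : List Int) : Prop := out = generate_values_alt numbers
instance (numbers : List Int) (out : List Int) : Decidable (Spec_generate_values numbers out) := by unfold Spec_generate_values; infer_instance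

-- ===== CLAIM (what is proved, stated in full; the proofs are below) =====
def Claim_equal_generate_values : Prop := ∀ (numbers : List Int), Dom_generate_values numbers → Spec_generate_values numbers (generate_values numbers)

-- ===== LEMMAS AND PROOFS =====

-- updating a set by elements it already contains does nothing
lemma pv_update_self (s ys : List Int) (h : ∀ y ∈ ys, y ∈ s) :
    PySem.Set.update s ys = s := by
  rw [PySem.Set.update_eq_append_filter]
  have hnil : (PySem.Set.ofList ys).filter (fun y => !(PySem.Set.contains s y)) = [] := by
    apply List.filter_eq_nil_iff.mpr
    intro y hy
    simpa using h y ((PySem.List.mem_dedup ys y).mp hy)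
  rw [hnil, List.append_nil]

-- B's inner loop is a Set.update by the flatMap of the two candidate values
lemma pv_foldl_update (l : List Int) (y : Int) (s : List Int) :
    l.foldl (fun nxt v => PySem.Set.add (PySem.Set.add nxt (v + y)) (v * y)) s
      = PySem.Set.update s (l.flatMap (fun v => [v + y, v * y])) := by
  induction l generalizing s with
  | nil => simp [PySem.Set.update_nil]
  | cons v l ih =>
      simp only [List.foldl_cons, List.flatMap_cons, ih]
      rw [PySem.Set.update_append, PySem.Set.update_cons, PySem.Set.update_cons, PySem.Set.update_nil]

-- deduplicating the inputs of a flatMap does not change the dedup of its output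
-- (the key fact: B's per-step dedup of partial results is harmless)
lemma pv_ofList_flatMap_dedup (l : List Int) (g : Int → List Int) :
    PySem.Set.ofList ((PySem.Set.ofList l).flatMap g) = PySem.Set.ofList (l.flatMap g) := by
  induction l using List.reverseRecOn with
  | nil => rfl
  | append_singleton l a ih =>
      rw [PySem.Set.ofList_append_singleton]
      by_cases hmem : a ∈ l
      · rw [show PySem.Set.add (PySem.Set.ofList l) a = PySem.Set.ofList l by
          simp [PySem.Set.add]; exact hmem]
        rw [ih, List.flatMap_append, PySem.Set.ofList_append]
        rw [pv_update_self]
        intro z hz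
        simp only [List.flatMap_cons, List.flatMap_nil, List.append_nil] at hz
        exact (PySem.List.mem_dedup _ z).mpr (List.mem_flatMap.mpr ⟨a, hmem, hz⟩)
      · rw [show PySem.Set.add (PySem.Set.ofList l) a = PySem.Set.ofList l ++ [a] by
          simp [PySem.Set.add]; exact hmem]
        rw [List.flatMap_append, PySem.Set.ofList_append, ih, ← PySem.Set.ofList_append, ← List.flatMap_append]

lemma pv_len_mem_product {k : Nat} {t : List Char} (h : t ∈ pvProduct k) : t.length = k := by
  induction k generalizing t with
  | zero => simp [pvProduct] at h; simp [h]
  | succ k ih =>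
      simp only [pvProduct, List.mem_append, List.mem_map] at h
      rcases h with ⟨u, hu, rfl⟩ | ⟨u, hu, rfl⟩ <;> simp [ih hu]

-- product(['+','*'], repeat=k+1) also decomposes on the LAST coordinate
lemma pv_product_succ_right (k : Nat) :
    pvProduct (k+1) = (pvProduct k).flatMap (fun t => [t ++ ['+'], t ++ ['*']]) := by
  induction k with
  | zero => rfl
  | succ k ih =>
      show (pvProduct (k+1)).map _ ++ (pvProduct (k+1)).map _ = List.flatMap _ (pvProduct (k+1))
      conv_rhs => rw [pvProduct]
      rw [ih]
      simp [List.map_flatMap, List.flatMap_map, List.flatMap_append]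

-- B's DP state after consuming rest = dedup of the evaluations of all op tuples, in A's order
lemma pv_main (rest : List Int) (x : Int) :
    rest.foldl
        (fun vals y =>
          vals.foldl (fun nxt v => PySem.Set.add (PySem.Set.add nxt (v + y)) (v * y))
            PySem.Set.empty)
        (PySem.Set.add PySem.Set.empty x)
      = PySem.Set.ofList ((pvProduct rest.length).map (fun t => (t.zip rest).foldl pvStep x)) := by
  induction rest using List.reverseRecOn with
  | nil => rfl
  | append_singleton rest y ih =>
      rw [List.foldl_append, List.foldl_cons, List.foldl_nil, ih]
      rw [pv_foldl_update, PySem.Set.update_empty, pv_ofList_flatMap_dedup,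
        List.flatMap_map]
      rw [show (rest ++ [y]).length = rest.length + 1 by simp, pv_product_succ_right,
        List.map_flatMap]
      congr 1
      apply List.flatMap_congr
      intro t ht
      have hlen : t.length = rest.length := pv_len_mem_product ht
      simp only [List.map_cons, List.map_nil, List.zip_append hlen, List.foldl_append,
        List.zip_cons_cons, List.zip_nil_right, List.foldl_cons, List.foldl_nil]
      rfl

-- inserting a key (value irrelevant) touches the key list like Set.add
lemma pv_keys_insert (d : PySem.Dict Int (Option Int)) (k : Int) (v : Option Int) :
    (d.insert k v).keys = PySem.Set.add d.keys k := by
  by_cases h : k ∈ d.keys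
  · rw [PySem.Dict.keys_insert_of_contains d v
      ((PySem.Dict.contains_eq_decide_mem_keys d k) ▸ decide_eq_true h)]
    simp [PySem.Set.add]; exact h
  · rw [PySem.Dict.keys_insert_of_not_contains d v
      (by rw [PySem.Dict.contains_eq_decide_mem_keys]; simpa using h)]
    simp [PySem.Set.add]; exact h

-- the keys of B's inner dict-building loop evolve exactly like the Set-valued loop
lemma pv_keys_inner (l : List Int) (y : Int) (d : PySem.Dict Int (Option Int)) :
    (l.foldl (fun nxt v => PySem.Dict.insert (PySem.Dict.insert nxt (v + y) none) (v * y) none) d).keys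
      = l.foldl (fun s v => PySem.Set.add (PySem.Set.add s (v + y)) (v * y)) d.keys := by
  induction l generalizing d with
  | nil => rfl
  | cons v l ih => simp only [List.foldl_cons, ih, pv_keys_insert]

-- … and so do the keys of the outer loop
lemma pv_keys_outer (rest : List Int) (d : PySem.Dict Int (Option Int)) :
    (rest.foldl
        (fun vals y =>
          vals.keys.foldl
            (fun nxt v => PySem.Dict.insert (PySem.Dict.insert nxt (v + y) none) (v * y) none)
            PySem.Dict.empty)
        d).keys
      = rest.foldl
          (fun vals y =>
            vals.foldl (fun nxt v => PySem.Set.add (PySem.Set.add nxt (v + y)) (v * y))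
              PySem.Set.empty)
          d.keys := by
  induction rest generalizing d with
  | nil => rfl
  | cons y rest ih =>
      simp only [List.foldl_cons, ih, pv_keys_inner]
      rfl

lemma pv_final (numbers : List Int) : generate_values numbers = generate_values_alt numbers := by
  cases numbers with
  | nil => rfl
  | cons x rest =>
      show (pvProduct ((x :: rest).length - 1)).foldl
        (fun results ops => PySem.Set.add results (pvEval (x :: rest) ops)) PySem.Set.empty = _
      have he : ∀ t, pvEval (x :: rest) t = (t.zip rest).foldl pvStep x := by
        intro t; simp [pvEval, PySem.List.pyGetD]
      rw [show (x :: rest).length - 1 = rest.length by simp]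
      calc (pvProduct rest.length).foldl
              (fun results ops => PySem.Set.add results (pvEval (x :: rest) ops)) PySem.Set.empty
          = PySem.Set.update PySem.Set.empty ((pvProduct rest.length).map (pvEval (x :: rest))) := by
            rw [PySem.Set.update_map_eq_foldl_add]
        _ = PySem.Set.ofList ((pvProduct rest.length).map (fun t => (t.zip rest).foldl pvStep x)) := by
            rw [PySem.Set.update_empty]; congr 1; exact List.map_congr_left (fun t _ => he t)
        _ = generate_values_alt (x :: rest) := by
            have h0 : generate_values_alt (x :: rest)
                = PySem.Set.ofList ((rest.foldl
                    (fun vals y =>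
                      vals.keys.foldl
                        (fun nxt v => PySem.Dict.insert (PySem.Dict.insert nxt (v + y) none) (v * y) none)
                        PySem.Dict.empty)
                    (PySem.Dict.insert (PySem.Dict.empty : PySem.Dict Int (Option Int)) x none)).keys) :=
              PySem.Set.ofList_eq_foldl _
            rw [h0, pv_keys_outer,
              show (PySem.Dict.insert (PySem.Dict.empty : PySem.Dict Int (Option Int)) x none).keys
                  = PySem.Set.add PySem.Set.empty x from rfl,
              pv_main, PySem.Set.ofList_ofList]

-- ===== VERDICT (by name: the statement is the Claim_ definition above) =====
theorem generate_values_spec : Claim_equal_generate_values := by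
  intro numbers _
  show generate_values numbers = generate_values_alt numbers
  exact pv_final numbers
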